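-- pv_equiv track=rewrite | github.com/kleofas97/ARPDATA10 | ARPDATA10_09/ex_04_PasswordHiding.py | hide_password
-- ===== SOURCE A (Python) =====
-- def hide_password(password):
--     """Ukrywa co trzecia litere w hasle password.
--
--     :param password: haslo z gwiazdkami co trzecia litere.
--     :return: napis z czesciowo ukrytym haslem.
--
--     """
--     new_password = ''
--
--     for index, letter in enumerate(password):
--         if index % 3 == 2:  # inne rozwiazanie (index+1) % 3 == 0
--             new_password += '*'
--         else:
--             new_password += letter
--     return new_password
-- ===== SOURCE B (Python) =====
-- def hide_password(password):
--     s = list(password)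
--     s[2::3] = '*' * len(s[2::3])
--     return ''.join(s)
-- ===== Notes on version B (the rewrite author's own statement) =====
-- stated objective: faster
-- what changed: Replaces the per-character enumerate loop with an index%3 branch and repeated string concatenation by strided slice assignment s[2::3] = '*'*k on a char list followed by one join.
import Mathlib
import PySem

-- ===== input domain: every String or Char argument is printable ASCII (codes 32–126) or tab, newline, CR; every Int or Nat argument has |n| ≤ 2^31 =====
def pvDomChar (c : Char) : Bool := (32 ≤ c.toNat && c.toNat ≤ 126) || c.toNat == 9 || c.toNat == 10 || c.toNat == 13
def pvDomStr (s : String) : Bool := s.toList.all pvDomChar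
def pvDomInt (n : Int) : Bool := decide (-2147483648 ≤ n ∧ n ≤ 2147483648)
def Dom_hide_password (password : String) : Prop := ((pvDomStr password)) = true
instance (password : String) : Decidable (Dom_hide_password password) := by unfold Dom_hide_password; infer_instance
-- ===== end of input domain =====

-- B replaces A's per-character loop-with-branch by strided slice assignment (set every index 2,5,8,… to '*').

-- ===== PORT A =====
-- A: accumulate the new password character by character, '*' at every index ≡ 2 (mod 3).
def hide_password (password : String) : String :=
  String.ofList ((PySem.List.enumerate password.toList 0).foldl
    (fun acc ic => acc ++ [if PySem.Int.mod ic.1 3 == 2 then '*' else ic.2]) [])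

-- ===== PORT B =====
-- B: s = list(password); s[2::3] = '*' * len(s[2::3]); ''.join(s).
-- The slice assignment writes '*' at each index of range(2, len(s), 3), ported as a fold of List.set.
def hide_password_alt (password : String) : String :=
  let s := password.toList
  String.ofList ((PySem.List.pyRange 2 (PySem.List.len s) 3).foldl
    (fun l i => l.set i.toNat '*') s)

-- ===== PRECONDITION & SPEC =====
def Spec_hide_password (password : String) (out : String) : Prop := out = hide_password_alt password
instance (password : String) (out : String) : Decidable (Spec_hide_password password out) := by unfold Spec_hide_password; infer_instance

-- ===== CLAIM (what is proved, stated in full; the proofs are below) =====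
def Claim_equal_hide_password : Prop := ∀ (password : String), Dom_hide_password password → Spec_hide_password password (hide_password password)

-- ===== LEMMAS AND PROOFS =====

-- A's append-fold is a map.
theorem foldl_append_singleton {α β : Type} (f : α → β) :
    ∀ (l : List α) (acc : List β),
      l.foldl (fun a p => a ++ [f p]) acc = acc ++ l.map f := by
  intro l
  induction l with
  | nil => simp
  | cons x xs ih => intro acc; simp [List.foldl_cons, ih]

-- B's set-fold, pointwise.
theorem getElem?_foldl_set (c : Char) :
    ∀ (idxs : List Int) (xs : List Char) (j : Nat),
      (idxs.foldl (fun l i => l.set i.toNat c) xs)[j]? =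
        if (∃ i ∈ idxs, i.toNat = j) ∧ j < xs.length then some c else xs[j]? := by
  intro idxs
  induction idxs with
  | nil => intro xs j; simp
  | cons i rest ih =>
    intro xs j
    rw [List.foldl_cons, ih]
    simp only [List.length_set, List.getElem?_set, List.mem_cons]
    by_cases hj : j < xs.length
    · by_cases hi : i.toNat = j
      · by_cases hr : ∃ i' ∈ rest, i'.toNat = j
        · simp [hj, hi, hr]
        · have : ¬ (∃ i' ∈ rest, i'.toNat = j) ∧ True := by simp [hr]
          simp [hj, hi, hr]
      · by_cases hr : ∃ i' ∈ rest, i'.toNat = j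
        · simp [hj, hi, hr]
        · have hno : ¬ ((∃ i' ∈ i :: rest, i'.toNat = j)) := by
            simp only [List.mem_cons]
            rintro ⟨i', (rfl | hmem), hv⟩
            · exact hi hv
            · exact hr ⟨i', hmem, hv⟩
          simp only [List.mem_cons] at hno ⊢
          simp [hj, hi, hr, hno]
    · by_cases hi : i.toNat = j
      · simp [hj, hi]
      · simp [hj, hi]

-- membership of j in the stride-3 index list
theorem mem_stride (n : Int) (j : Nat) :
    (∃ i ∈ PySem.List.pyRange 2 n 3, i.toNat = j) ↔ (j % 3 = 2 ∧ (j : Int) < n) := by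
  constructor
  · rintro ⟨i, hmem, rfl⟩
    rw [PySem.List.mem_pyRange_iff_of_pos (by norm_num)] at hmem
    obtain ⟨h1, h2, k, hk⟩ := hmem
    omega
  · rintro ⟨h1, h2⟩
    refine ⟨(j : Int), ?_, by omega⟩
    rw [PySem.List.mem_pyRange_iff_of_pos (by norm_num)]
    refine ⟨by omega, h2, ⟨((j : Int) - 2) / 3, by omega⟩⟩

theorem lists_eq (xs : List Char) :
    (PySem.List.enumerate xs 0).foldl
      (fun acc ic => acc ++ [if PySem.Int.mod ic.1 3 == 2 then '*' else ic.2]) [] =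
    (PySem.List.pyRange 2 (PySem.List.len xs) 3).foldl (fun l i => l.set i.toNat '*') xs := by
  rw [foldl_append_singleton]
  apply List.ext_getElem?
  intro j
  rw [getElem?_foldl_set]
  simp only [PySem.List.len_eq]
  by_cases hj : j < xs.length
  · have hm := mem_stride (xs.length : Int) j
    have hA : ((PySem.List.enumerate xs 0).map
        (fun ic => if PySem.Int.mod ic.1 3 == 2 then '*' else ic.2))[j]? =
        (xs[j]?.map (fun x => if PySem.Int.mod ((j : Int)) 3 == 2 then '*' else x)) := by
      rw [List.getElem?_map, PySem.List.getElem?_enumerate]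
      cases xs[j]? <;> simp
    rw [List.nil_append, hA]
    have hx : xs[j]? = some xs[j] := List.getElem?_eq_getElem hj
    rw [hx]
    have hmod : (PySem.Int.mod ((j : Int)) 3 == 2) = decide (j % 3 = 2) := by
      rw [PySem.Int.mod_eq_emod_of_pos (by norm_num)]
      by_cases h : j % 3 = 2 <;> simp [h] <;> omega
    rw [hmod]
    by_cases h : j % 3 = 2
    · simp [h, hm, hj, show ((j : Int) < (xs.length : Int)) from by omega]
    · have : ¬ ((∃ i ∈ PySem.List.pyRange 2 (xs.length : Int) 3, i.toNat = j) ∧ j < xs.length) := by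
        rw [hm]; tauto
      simp [h, this]
  · have hx : xs[j]? = none := List.getElem?_eq_none (by omega)
    have : ¬ ((∃ i ∈ PySem.List.pyRange 2 (xs.length : Int) 3, i.toNat = j) ∧ j < xs.length) := by
      tauto
    simp only [List.nil_append, List.getElem?_map, PySem.List.getElem?_enumerate, hx, this,
      if_false, Option.map_none]

-- ===== VERDICT (by name: the statement is the Claim_ definition above) =====
theorem hide_password_spec : Claim_equal_hide_password := by
  intro password _
  unfold Spec_hide_password hide_password hide_password_alt
  exact congrArg String.ofList (lists_eq password.toList)
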